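-- pv_equiv track=rewrite | github.com/Sanddino00/FixManager-for-XXMI | FixHub0.3.0/Resources/gi/ORFixApplier_Ver_4_1.py | split_ifelseblocks
-- ===== SOURCE A (Python) =====
-- def split_ifelseblocks(section: str) -> list[str]:
--     """Split the section into if-else blocks"""
--     blocks: list[str] = []
--     block: str = ""
--     for line in section.splitlines(keepends=True):
--         block += line
--         l_strip = line.strip().lower()
--         if l_strip.startswith("if") or l_strip.startswith("else"):
--             blocks.append(block)
--             block = ""
--         elif l_strip.startswith("endif"):
--             blocks.append(block)
--             block = ""
--             continue
--     if block:
--         blocks.append(block)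
--     return blocks
-- ===== SOURCE B (Python) =====
-- def _boundary(line: str) -> bool:
--     return line.strip().lower().startswith(("if", "else", "endif"))
--
--
-- def split_ifelseblocks(section: str) -> list[str]:
--     """Split the section into if-else blocks"""
--     lines = section.splitlines(keepends=True)
--     bounds = [i for i, ln in enumerate(lines) if _boundary(ln)]
--     blocks: list[str] = []
--     start = 0
--     for i in bounds:
--         blocks.append("".join(lines[start:i + 1]))
--         start = i + 1
--     if start < len(lines):
--         blocks.append("".join(lines[start:]))
--     return blocks
-- ===== Notes on version B (the rewrite author's own statement) =====
-- stated objective: alternative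
-- what changed: B replaces A's single pass with a running string accumulator by a two-phase decomposition: it first collects the boundary line indices (lines whose stripped lowercase starts with if/else/endif) and then slices the line list at those indices, joining each slice into a block.
import Mathlib
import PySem

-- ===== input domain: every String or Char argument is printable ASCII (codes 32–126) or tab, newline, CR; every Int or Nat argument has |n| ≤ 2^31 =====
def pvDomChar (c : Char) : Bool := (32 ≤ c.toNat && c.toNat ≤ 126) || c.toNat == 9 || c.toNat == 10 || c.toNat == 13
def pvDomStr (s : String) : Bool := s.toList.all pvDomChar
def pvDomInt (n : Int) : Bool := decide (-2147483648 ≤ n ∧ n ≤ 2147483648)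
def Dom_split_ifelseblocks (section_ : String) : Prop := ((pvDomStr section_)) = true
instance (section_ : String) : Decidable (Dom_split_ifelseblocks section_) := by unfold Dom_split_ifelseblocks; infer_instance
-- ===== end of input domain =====

-- B splits the text by first collecting the boundary line indices and then slicing the line
-- list there, instead of A's single pass with a running string accumulator (objective: alternative).

-- shared helper: section.splitlines(keepends=True), hand-ported; exact on Dom inputs, where the
-- only possible line breaks are '\n', '\r' and '\r\n' (Python also breaks on \v, \f, …, outside Dom)
def pvSplitlinesKeep (acc : List Char) : List Char → List (List Char)
  | [] => if acc.isEmpty then [] else [acc]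
  | '\r' :: '\n' :: rest => (acc ++ ['\r', '\n']) :: pvSplitlinesKeep [] rest
  | '\r' :: rest => (acc ++ ['\r']) :: pvSplitlinesKeep [] rest
  | '\n' :: rest => (acc ++ ['\n']) :: pvSplitlinesKeep [] rest
  | c :: rest => pvSplitlinesKeep (acc ++ [c]) rest

-- ===== PORT A =====
def pvLoopA (blocks : List (List Char)) (block : List Char) :
    List (List Char) → List (List Char) × List Char
  | [] => (blocks, block)
  | line :: rest =>
    let b := block ++ line
    let l_strip := PySem.Chars.lower (PySem.Chars.strip line)
    if PySem.Chars.startswith l_strip ['i', 'f'] ||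
        PySem.Chars.startswith l_strip ['e', 'l', 's', 'e'] then
      pvLoopA (blocks ++ [b]) [] rest
    else if PySem.Chars.startswith l_strip ['e', 'n', 'd', 'i', 'f'] then
      pvLoopA (blocks ++ [b]) [] rest
    else
      pvLoopA blocks b rest

def split_ifelseblocks (section_ : String) : List String :=
  let r := pvLoopA [] [] (pvSplitlinesKeep [] section_.toList)
  (if r.2.isEmpty then r.1 else r.1 ++ [r.2]).map (fun cs => String.ofList cs)

-- ===== PORT B =====
def pvBoundaryB (line : List Char) : Bool :=
  let s := PySem.Chars.lower (PySem.Chars.strip line)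
  PySem.Chars.startswith s ['i', 'f'] || PySem.Chars.startswith s ['e', 'l', 's', 'e'] ||
    PySem.Chars.startswith s ['e', 'n', 'd', 'i', 'f']

def split_ifelseblocks_alt (section_ : String) : List String :=
  let lines := pvSplitlinesKeep [] section_.toList
  let bounds := (PySem.List.enumerate lines 0).filterMap
    (fun p => if pvBoundaryB p.2 then some p.1 else none)
  let r := bounds.foldl
    (fun st i =>
      (st.1 ++ [PySem.Chars.join [] (PySem.List.slice lines (some st.2) (some (i + 1)))], i + 1))
    (([] : List (List Char)), (0 : Int))
  let blocks :=
    if r.2 < (lines.length : Int) then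
      r.1 ++ [PySem.Chars.join [] (PySem.List.slice lines (some r.2) none)]
    else r.1
  blocks.map (fun cs => String.ofList cs)

-- ===== PRECONDITION & SPEC =====
def Spec_split_ifelseblocks (section_ : String) (out : List String) : Prop := out = split_ifelseblocks_alt section_
instance (section_ : String) (out : List String) : Decidable (Spec_split_ifelseblocks section_ out) := by unfold Spec_split_ifelseblocks; infer_instance

-- ===== CLAIM (what is proved, stated in full; the proofs are below) =====
def Claim_equal_split_ifelseblocks : Prop := ∀ (section_ : String), Dom_split_ifelseblocks section_ → Spec_split_ifelseblocks section_ (split_ifelseblocks section_)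

-- ===== LEMMAS AND PROOFS =====

-- reference splitter: one block per boundary line, pending text accumulated in acc
def pvH (acc : List Char) : List ((List Char)) → List (List Char)
  | [] => if acc.isEmpty then [] else [acc]
  | l :: ls => if pvBoundaryB l then (acc ++ l) :: pvH [] ls else pvH (acc ++ l) ls

-- boundary indices of the lines, counting from k
def pvBounds (k : Nat) : List (List Char) → List Nat
  | [] => []
  | l :: ls => if pvBoundaryB l then k :: pvBounds (k + 1) ls else pvBounds (k + 1) ls

theorem pvLoopA_eq_pvH : ∀ (ls : List (List Char)) (blocks : List (List Char)) (acc : List Char),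
    (if (pvLoopA blocks acc ls).2 = [] then (pvLoopA blocks acc ls).1
      else (pvLoopA blocks acc ls).1 ++ [(pvLoopA blocks acc ls).2]) = blocks ++ pvH acc ls := by
  intro ls
  induction ls with
  | nil =>
    intro blocks acc
    by_cases h : acc = [] <;> simp [pvLoopA, pvH, h]
  | cons line rest ih =>
    intro blocks acc
    by_cases h12 : (PySem.Chars.startswith (PySem.Chars.lower (PySem.Chars.strip line)) ['i', 'f'] ||
        PySem.Chars.startswith (PySem.Chars.lower (PySem.Chars.strip line)) ['e', 'l', 's', 'e']) = true
    · have hb : pvBoundaryB line = true := by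
        simp only [pvBoundaryB]
        simp only [Bool.or_eq_true] at h12 ⊢
        tauto
      rw [show pvLoopA blocks acc (line :: rest) = pvLoopA (blocks ++ [acc ++ line]) [] rest from by
        simp [pvLoopA, h12]]
      rw [ih]
      simp [pvH, hb]
    · by_cases h3 : PySem.Chars.startswith (PySem.Chars.lower (PySem.Chars.strip line))
          ['e', 'n', 'd', 'i', 'f'] = true
      · have hb : pvBoundaryB line = true := by
          simp only [pvBoundaryB]
          simp only [Bool.or_eq_true] at ⊢
          tauto
        rw [show pvLoopA blocks acc (line :: rest) = pvLoopA (blocks ++ [acc ++ line]) [] rest from by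
          simp only [Bool.or_eq_true, not_or] at h12
          simp [pvLoopA, h12.1, h12.2, h3]]
        rw [ih]
        simp [pvH, hb]
      · have hb : pvBoundaryB line = false := by
          simp only [pvBoundaryB]
          simp only [Bool.or_eq_true, not_or] at h12
          simp [h12.1, h12.2, h3]
        rw [show pvLoopA blocks acc (line :: rest) = pvLoopA blocks (acc ++ line) rest from by
          simp only [Bool.or_eq_true, not_or] at h12
          simp [pvLoopA, h12.1, h12.2, h3]]
        rw [ih]
        simp [pvH, hb]

theorem pvEnum_filterMap_eq_pvBounds : ∀ (ls : List (List Char)) (k : Nat),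
    (PySem.List.enumerate ls (k : Int)).filterMap
        (fun p => if pvBoundaryB p.2 then some p.1 else none)
      = (pvBounds k ls).map (fun n => ((n : Nat) : Int)) := by
  intro ls
  induction ls with
  | nil => intro k; simp [pvBounds, PySem.List.enumerate_nil]
  | cons l ls ih =>
    intro k
    rw [PySem.List.enumerate_cons]
    have ih' := ih (k + 1)
    simp only [Nat.cast_add, Nat.cast_one] at ih'
    by_cases h : pvBoundaryB l <;>
      simp [pvBounds, h, ih']

theorem pvJoin_nil_eq_flatten : ∀ ps : List (List Char), PySem.Chars.join [] ps = ps.flatten := by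
  intro ps
  induction ps with
  | nil => simp [PySem.Chars.join, List.intercalate]
  | cons p ps ih =>
    cases ps with
    | nil => simp [PySem.Chars.join, List.intercalate]
    | cons q r =>
      show List.intercalate [] (p :: q :: r) = _
      rw [show List.intercalate [] (p :: q :: r) = p ++ List.intercalate [] (q :: r) from by
        simp [List.intercalate, List.intersperse]]
      rw [List.flatten_cons, ← ih]
      rfl

theorem pvH_append_nb : ∀ (pre rest : List (List Char)) (acc : List Char),
    (∀ l ∈ pre, pvBoundaryB l = false) →
    pvH acc (pre ++ rest) = pvH (acc ++ pre.flatten) rest := by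
  intro pre
  induction pre with
  | nil => intro rest acc _; simp
  | cons p pre ih =>
    intro rest acc h
    have hp : pvBoundaryB p = false := h p (by simp)
    simp only [List.cons_append, pvH, hp, Bool.false_eq_true, if_false]
    rw [ih rest (acc ++ p) (fun l hl => h l (by simp [hl]))]
    simp

theorem pvBounds_append_nb : ∀ (pre : List (List Char)) (k : Nat) (rest : List (List Char)),
    (∀ l ∈ pre, pvBoundaryB l = false) →
    pvBounds k (pre ++ rest) = pvBounds (k + pre.length) rest := by
  intro pre
  induction pre with
  | nil => intro k rest _; simp
  | cons p pre ih =>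
    intro k rest h
    have hp : pvBoundaryB p = false := h p (by simp)
    simp only [List.cons_append, pvBounds, hp, Bool.false_eq_true, if_false]
    rw [ih (k + 1) rest (fun l hl => h l (by simp [hl]))]
    congr 1
    simp; omega

theorem pvTake_succ_append : ∀ (nb : List (List Char)) (b : List Char) (rest : List (List Char)),
    (nb ++ b :: rest).take (nb.length + 1) = nb ++ [b] := by
  intro nb
  induction nb with
  | nil => intro b rest; simp
  | cons x nb ih => intro b rest; simp [List.take_succ_cons, ih]

theorem pvSplitlinesKeep_ne_nil : ∀ (acc cs : List Char) (l : List Char),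
    l ∈ pvSplitlinesKeep acc cs → l ≠ [] := by
  intro acc cs
  induction acc, cs using pvSplitlinesKeep.induct with
  | case1 acc h => intro l hl; simp [pvSplitlinesKeep, h] at hl
  | case2 acc h =>
    intro l hl
    simp [pvSplitlinesKeep, h] at hl
    subst hl; simpa [List.isEmpty_iff] using h
  | case3 acc rest ih =>
    intro l hl
    simp only [pvSplitlinesKeep, List.mem_cons] at hl
    rcases hl with rfl | hl
    · simp
    · exact ih l hl
  | case4 acc rest h1 ih =>
    intro l hl
    rw [show pvSplitlinesKeep acc ('\r' :: rest) = (acc ++ ['\r']) :: pvSplitlinesKeep [] rest from by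
      rw [pvSplitlinesKeep.eq_def]; simp only []] at hl
    rcases List.mem_cons.mp hl with rfl | hl2
    · simp
    · exact ih l hl2
  | case5 acc rest ih =>
    intro l hl
    simp only [pvSplitlinesKeep, List.mem_cons] at hl
    rcases hl with rfl | hl
    · simp
    · exact ih l hl
  | case6 acc c rest h1 h2 h3 ih =>
    intro l hl
    rw [show pvSplitlinesKeep acc (c :: rest) = pvSplitlinesKeep (acc ++ [c]) rest from by
      rw [pvSplitlinesKeep.eq_def]; simp only []] at hl
    exact ih l hl

theorem pvFoldB_eq_pvH : ∀ (n : Nat) (suf pre blocks lines : List (List Char)),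
    suf.length ≤ n → lines = pre ++ suf → (∀ l ∈ suf, l ≠ []) →
    (let r := ((pvBounds pre.length suf).map (fun m => ((m : Nat) : Int))).foldl
        (fun st i =>
          (st.1 ++ [PySem.Chars.join [] (PySem.List.slice lines (some st.2) (some (i + 1)))], i + 1))
        (blocks, (pre.length : Int));
      if r.2 < (lines.length : Int) then
        r.1 ++ [PySem.Chars.join [] (PySem.List.slice lines (some r.2) none)]
      else r.1) = blocks ++ pvH [] suf := by
  intro n
  induction n with
  | zero =>
    intro suf pre blocks lines hn hsplit hne
    have hs : suf = [] := List.eq_nil_of_length_eq_zero (Nat.le_zero.mp hn)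
    subst hs
    subst hsplit
    simp [pvBounds, pvH]
  | succ m ih =>
    intro suf pre blocks lines hn hsplit hne
    have hsd : suf.takeWhile (fun l => !pvBoundaryB l) ++ suf.dropWhile (fun l => !pvBoundaryB l)
        = suf := List.takeWhile_append_dropWhile
    cases hrest : suf.dropWhile (fun l => !pvBoundaryB l) with
    | nil =>
      have hts : suf.takeWhile (fun l => !pvBoundaryB l) = suf := by
        rw [hrest] at hsd; simpa using hsd
      have hnb : ∀ l ∈ suf, pvBoundaryB l = false := by
        intro l hl
        have := List.mem_takeWhile_imp (l := suf) (p := fun l => !pvBoundaryB l) (hts ▸ hl)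
        simpa using this
      have hbounds : pvBounds pre.length suf = [] := by
        have := pvBounds_append_nb suf pre.length [] hnb
        simpa [pvBounds] using this
      simp only [hbounds, List.map_nil, List.foldl_nil]
      cases hsuf : suf with
      | nil => subst hsuf; subst hsplit; simp [pvH]
      | cons s ss =>
        subst hsuf
        have hlt : (pre.length : Int) < (lines.length : Int) := by
          subst hsplit; simp
        rw [if_pos hlt]
        rw [PySem.List.slice_from lines (by positivity)]
        have hdrop : lines.drop ((pre.length : Int)).toNat = s :: ss := by
          subst hsplit; simp
        rw [hdrop, pvJoin_nil_eq_flatten]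
        have hH : pvH [] (s :: ss) = pvH (s :: ss).flatten [] := by
          have := pvH_append_nb (s :: ss) [] [] hnb
          simpa using this
        have hfl : (s :: ss).flatten ≠ [] := by
          have : s ≠ [] := hne s (by simp)
          simp only [List.flatten_cons]
          intro hcon
          exact this (List.append_eq_nil_iff.mp hcon).1
        rw [hH]
        simp only [pvH]
        rw [if_neg (by simpa [List.isEmpty_iff] using hfl)]
    | cons bnd rest' =>
      have hpb : pvBoundaryB bnd = true := by
        have := List.head?_dropWhile_not (fun l => !pvBoundaryB l) suf
        rw [hrest] at this
        simpa using this
      have hnb : ∀ l ∈ suf.takeWhile (fun l => !pvBoundaryB l), pvBoundaryB l = false := by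
        intro l hl
        have := List.mem_takeWhile_imp hl
        simpa using this
      have hsuf : suf = suf.takeWhile (fun l => !pvBoundaryB l) ++ bnd :: rest' := by
        conv_lhs => rw [← hsd, hrest]
      set nb := suf.takeWhile (fun l => !pvBoundaryB l) with hnbdef
      have hbounds : pvBounds pre.length suf
          = (pre.length + nb.length) :: pvBounds (pre.length + nb.length + 1) rest' := by
        rw [hsuf, pvBounds_append_nb nb pre.length _ hnb]
        simp [pvBounds, hpb]
      rw [hbounds]
      simp only [List.map_cons, List.foldl_cons]
      have hcast : ((pre.length + nb.length : Nat) : Int) + 1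
          = ((pre.length + nb.length + 1 : Nat) : Int) := by push_cast; ring
      rw [hcast, PySem.List.slice_natCast lines pre.length (pre.length + nb.length + 1)]
      have hdrop : lines.drop pre.length = nb ++ bnd :: rest' := by
        rw [hsplit, hsuf]; simp
      have htake : (lines.drop pre.length).take (pre.length + nb.length + 1 - pre.length)
          = nb ++ [bnd] := by
        rw [hdrop, show pre.length + nb.length + 1 - pre.length = nb.length + 1 by omega,
          pvTake_succ_append]
      rw [htake]
      have hlen : rest'.length ≤ m := by
        have := congrArg List.length hsuf
        simp at this
        omega
      have happ : lines = (pre ++ nb ++ [bnd]) ++ rest' := by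
        rw [hsplit, hsuf]; simp
      have hne' : ∀ l ∈ rest', l ≠ [] := by
        intro l hl
        exact hne l (by rw [hsuf]; simp [hl])
      have hIH := ih rest' (pre ++ nb ++ [bnd])
        (blocks ++ [PySem.Chars.join [] (nb ++ [bnd])]) lines hlen happ hne'
      have hplen : (pre ++ nb ++ [bnd]).length = pre.length + nb.length + 1 := by
        simp only [List.length_append, List.length_cons, List.length_nil]
      rw [hplen] at hIH
      rw [hIH, hsuf]
      rw [pvH_append_nb nb (bnd :: rest') [] hnb]
      simp only [List.nil_append, pvH, hpb, if_true]
      rw [pvJoin_nil_eq_flatten]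
      simp

-- ===== VERDICT (by name: the statement is the Claim_ definition above) =====
theorem split_ifelseblocks_spec : Claim_equal_split_ifelseblocks := by
  intro section_ _
  unfold Spec_split_ifelseblocks split_ifelseblocks split_ifelseblocks_alt
  simp only []
  congr 1
  have hA := pvLoopA_eq_pvH (pvSplitlinesKeep [] section_.toList) [] []
  have hB := pvFoldB_eq_pvH (pvSplitlinesKeep [] section_.toList).length
      (pvSplitlinesKeep [] section_.toList) [] [] (pvSplitlinesKeep [] section_.toList)
      le_rfl (by simp) (pvSplitlinesKeep_ne_nil [] section_.toList)
  have hEnum := pvEnum_filterMap_eq_pvBounds (pvSplitlinesKeep [] section_.toList) 0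
  simp only [List.length_nil, Nat.cast_zero, List.nil_append] at hB hEnum
  rw [hEnum, hB]
  simp only [List.isEmpty_iff]
  rw [hA]
  simp
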